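-- pv_equiv track=rewrite | github.com/jacobemerick/health-sync | health_ingest/workouts_handler.py | dedup_workouts
-- ===== SOURCE A (Python) =====
-- def dedup_workouts(workouts):
--     by_start = {}
--     for w in workouts:
--         start = w.get("start", "")
--         if start not in by_start:
--             by_start[start] = w
--         else:
--             existing = by_start[start]
--             if w.get("distance") is not None and existing.get("distance") is None:
--                 by_start[start] = w
--     return list(by_start.values())
-- ===== SOURCE B (Python) =====
-- def dedup_workouts(workouts):
--     groups = {}
--     for w in workouts:
--         groups.setdefault(w.get("start", ""), []).append(w)
--     return [
--         next((w for w in g if w.get("distance") is not None), g[0])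
--         for g in groups.values()
--     ]
-- ===== Notes on version B (the rewrite author's own statement) =====
-- stated objective: alternative
-- what changed: Replaces A's single-pass inline keep/replace rule with a two-phase shape: first group all workouts by their start key in input order, then select from each group the first workout with a non-None distance (falling back to the group's first workout).
import Mathlib
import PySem

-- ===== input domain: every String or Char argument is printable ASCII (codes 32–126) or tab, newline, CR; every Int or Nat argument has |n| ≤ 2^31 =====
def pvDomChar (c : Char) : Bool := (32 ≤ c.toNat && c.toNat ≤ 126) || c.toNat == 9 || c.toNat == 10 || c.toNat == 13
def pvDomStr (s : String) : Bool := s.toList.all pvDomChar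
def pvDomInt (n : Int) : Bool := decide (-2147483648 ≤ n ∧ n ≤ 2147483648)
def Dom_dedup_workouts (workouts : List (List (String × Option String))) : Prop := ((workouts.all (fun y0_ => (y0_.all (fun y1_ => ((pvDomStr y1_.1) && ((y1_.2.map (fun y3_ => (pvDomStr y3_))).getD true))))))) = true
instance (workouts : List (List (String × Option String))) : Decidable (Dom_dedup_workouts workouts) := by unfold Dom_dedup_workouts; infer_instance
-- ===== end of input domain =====

-- B replaces A's single-pass keep/replace rule by group-by-start then pick-first-with-distance;
-- same output, a different (two-phase) decomposition.

-- ===== PORT A =====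
-- w.get(k) on a workout dict (assoc list, first match)
def pvLookup (w : List (String × Option String)) (k : String) : Option (Option String) :=
  (PySem.Dict.mk w).get? k

-- w.get("start", "")
def pvStart (w : List (String × Option String)) : Option String :=
  match pvLookup w "start" with
  | some v => v
  | none => some ""

-- w.get("distance")
def pvDist (w : List (String × Option String)) : Option String :=
  match pvLookup w "distance" with
  | some v => v
  | none => none

-- body of A's loop
def pvStepA (d : PySem.Dict (Option String) (List (String × Option String)))
    (w : List (String × Option String)) :
    PySem.Dict (Option String) (List (String × Option String)) :=
  let start := pvStart w
  if d.contains start = false then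
    d.insert start w
  else
    let existing := d.getD start []
    if (pvDist w).isSome && !(pvDist existing).isSome then d.insert start w else d

def dedup_workouts (workouts : List (List (String × Option String))) : List (List (String × Option String)) :=
  (workouts.foldl pvStepA PySem.Dict.empty).values

-- ===== PORT B =====
-- body of B's grouping loop: groups.setdefault(w.get("start",""), []).append(w)
def pvStepB (d : PySem.Dict (Option String) (List (List (String × Option String))))
    (w : List (String × Option String)) :
    PySem.Dict (Option String) (List (List (String × Option String))) :=
  d.modify (pvStart w) [] (fun g => g ++ [w])

-- next((w for w in g if w.get("distance") is not None), g[0])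
def pvPick (g : List (List (String × Option String))) : List (String × Option String) :=
  (g.find? (fun w => (pvDist w).isSome)).getD (g.headD [])

def dedup_workouts_alt (workouts : List (List (String × Option String))) : List (List (String × Option String)) :=
  ((workouts.foldl pvStepB PySem.Dict.empty).values).map pvPick

-- ===== PRECONDITION & SPEC =====
def Spec_dedup_workouts (workouts : List (List (String × Option String))) (out : List (List (String × Option String))) : Prop := out = dedup_workouts_alt workouts
instance (workouts : List (List (String × Option String))) (out : List (List (String × Option String))) : Decidable (Spec_dedup_workouts workouts out) := by unfold Spec_dedup_workouts; infer_instance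

-- ===== CLAIM (what is proved, stated in full; the proofs are below) =====
def Claim_equal_dedup_workouts : Prop := ∀ (workouts : List (List (String × Option String))), Dom_dedup_workouts workouts → Spec_dedup_workouts workouts (dedup_workouts workouts)

-- ===== LEMMAS AND PROOFS =====

-- the relation carried through the two loops: A's dict is B's grouping dict with pvPick applied to every group
def pvRel (dA : PySem.Dict (Option String) (List (String × Option String)))
    (dG : PySem.Dict (Option String) (List (List (String × Option String)))) : Prop :=
  dA.items = dG.items.map (fun p => (p.1, pvPick p.2))

lemma pvPick_singleton (w : List (String × Option String)) : pvPick [w] = w := by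
  unfold pvPick
  cases h : (pvDist w).isSome <;> simp [List.find?, h]

lemma pvPick_append (g : List (List (String × Option String))) (w : List (String × Option String))
    (hg : g ≠ []) :
    pvPick (g ++ [w]) =
      if (pvDist w).isSome && !(pvDist (pvPick g)).isSome then w else pvPick g := by
  unfold pvPick
  cases hfind : g.find? (fun w => (pvDist w).isSome) with
  | some x =>
      have hx : (fun w => (pvDist w).isSome) x = true := List.find?_some (p := fun w => (pvDist w).isSome) hfind
      simp only [List.find?_append, hfind, Option.getD_some]
      simp only at hx
      simp [hx]
  | none =>
      obtain ⟨a, t, rfl⟩ := List.exists_cons_of_ne_nil hg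
      have hall := List.find?_eq_none.mp hfind
      have ha : ¬ ((pvDist a).isSome = true) := hall a (by simp)
      rw [List.find?_append, hfind]
      cases hw : (pvDist w).isSome with
      | true => simp [List.find?, hw, ha]
      | false => simp [List.find?, hw, ha]

lemma contains_of_rel (dA : PySem.Dict (Option String) (List (String × Option String)))
    (dG : PySem.Dict (Option String) (List (List (String × Option String))))
    (hrel : pvRel dA dG) (k : Option String) :
    dA.contains k = dG.contains k := by
  unfold pvRel at hrel
  simp [PySem.Dict.contains, hrel, List.any_map, Function.comp_def]

lemma get?_of_rel (dA : PySem.Dict (Option String) (List (String × Option String)))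
    (dG : PySem.Dict (Option String) (List (List (String × Option String))))
    (hrel : pvRel dA dG) (k : Option String) :
    dA.get? k = (dG.get? k).map pvPick := by
  unfold pvRel at hrel
  simp [PySem.Dict.get?, hrel, List.find?_map, Function.comp_def, Option.map_map]

lemma step_rel (dA : PySem.Dict (Option String) (List (String × Option String)))
    (dG : PySem.Dict (Option String) (List (List (String × Option String))))
    (hrel : pvRel dA dG) (hne : ∀ p ∈ dG.items, p.2 ≠ []) (hnd : dG.keys.Nodup)
    (w : List (String × Option String)) :
    pvRel (pvStepA dA w) (pvStepB dG w) := by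
  unfold pvRel at hrel ⊢
  have hcont := contains_of_rel dA dG hrel (pvStart w)
  simp only [pvStepA, pvStepB, PySem.Dict.modify]
  cases hc : dG.contains (pvStart w) with
  | false =>
      have hgd : dG.getD (pvStart w) [] = [] := PySem.Dict.getD_of_not_contains dG [] hc
      rw [if_pos (show dA.contains (pvStart w) = false by rw [hcont]; exact hc)]
      simp only [hgd]
      rw [PySem.Dict.items_insert_of_not_contains dA w (by rw [hcont]; exact hc),
          PySem.Dict.items_insert_of_not_contains dG _ hc]
      simp [hrel, pvPick_singleton]
  | true =>
      -- the existing group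
      have hget : ∃ g, dG.get? (pvStart w) = some g := by
        cases hg : dG.get? (pvStart w) with
        | some g => exact ⟨g, rfl⟩
        | none =>
            exfalso
            have := PySem.Dict.contains_eq_isSome_get? dG (pvStart w)
            rw [hc, hg] at this
            simp at this
      obtain ⟨g, hg⟩ := hget
      have hgd : dG.getD (pvStart w) [] = g := PySem.Dict.getD_of_get?_eq_some dG [] hg
      have hmem : (pvStart w, g) ∈ dG.items := PySem.Dict.mem_items_of_get?_eq_some dG hg
      have hgne : g ≠ [] := hne _ hmem
      have hexist : dA.getD (pvStart w) [] = pvPick g := by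
        have := get?_of_rel dA dG hrel (pvStart w)
        rw [hg] at this
        simp [PySem.Dict.getD, this]
      -- every entry of dG whose key is pvStart w holds exactly g
      have huniq : ∀ p ∈ dG.items, (p.1 == pvStart w) = true → p.2 = g := by
        intro p hp hpk
        have hpk' : p.1 = pvStart w := eq_of_beq hpk
        have : dG.get? p.1 = some p.2 :=
          PySem.Dict.get?_of_mem_items dG (by simpa using hp) hnd
        rw [hpk', hg] at this
        simpa using this.symm
      rw [if_neg (show ¬ dA.contains (pvStart w) = false by rw [hcont, hc]; simp)]
      simp only [hgd, hexist]
      cases hcond : (pvDist w).isSome && !(pvDist (pvPick g)).isSome with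
      | true =>
          have hpa : pvPick (g ++ [w]) = w := by
            rw [pvPick_append g w hgne, hcond]; simp
          rw [if_pos rfl]
          rw [PySem.Dict.items_insert_of_contains dA w (by rw [hcont]; exact hc),
              PySem.Dict.items_insert_of_contains dG _ hc]
          rw [hrel, List.map_map, List.map_map]
          apply List.map_congr_left
          intro p hp
          by_cases hk : p.1 = pvStart w
          · simp [hk, hpa]
          · simp [hk]
      | false =>
          have hpa : pvPick (g ++ [w]) = pvPick g := by
            rw [pvPick_append g w hgne, hcond]; simp
          rw [if_neg (by simp)]
          rw [PySem.Dict.items_insert_of_contains dG _ hc]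
          rw [hrel, List.map_map]
          apply List.map_congr_left
          intro p hp
          by_cases hk : p.1 = pvStart w
          · have hpg := huniq p hp (by simp [hk])
            simp [hk, hpa, hpg]
          · simp [hk]

lemma ne_step (dG : PySem.Dict (Option String) (List (List (String × Option String))))
    (hne : ∀ p ∈ dG.items, p.2 ≠ []) (w : List (String × Option String)) :
    ∀ p ∈ (pvStepB dG w).items, p.2 ≠ [] := by
  intro p hp
  unfold pvStepB PySem.Dict.modify at hp
  rcases (PySem.Dict.mem_items_insert _ _ _ _).mp hp with h | h
  · subst h; simp
  · exact hne p h.1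

lemma loop_rel (ws : List (List (String × Option String)))
    (dA : PySem.Dict (Option String) (List (String × Option String)))
    (dG : PySem.Dict (Option String) (List (List (String × Option String))))
    (hrel : pvRel dA dG) (hne : ∀ p ∈ dG.items, p.2 ≠ []) (hnd : dG.keys.Nodup) :
    pvRel (ws.foldl pvStepA dA) (ws.foldl pvStepB dG) := by
  induction ws generalizing dA dG with
  | nil => simpa using hrel
  | cons w ws ih =>
      simp only [List.foldl_cons]
      exact ih _ _ (step_rel dA dG hrel hne hnd w) (ne_step dG hne w)
        (PySem.Dict.nodup_keys_insert _ _ _ hnd)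

-- ===== VERDICT (by name: the statement is the Claim_ definition above) =====
theorem dedup_workouts_spec : Claim_equal_dedup_workouts := by
  unfold Claim_equal_dedup_workouts
  intro workouts _
  unfold Spec_dedup_workouts dedup_workouts dedup_workouts_alt
  have h := loop_rel workouts PySem.Dict.empty PySem.Dict.empty (by rfl)
    (by intro p hp; simp [PySem.Dict.empty] at hp) (by simp [PySem.Dict.empty, PySem.Dict.keys])
  unfold pvRel at h
  simp [PySem.Dict.values, h, List.map_map, Function.comp]
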